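-- pv_equiv track=rewrite | github.com/dewi-elisa/Thesis-AI | Code/mlsd/assignment2/data_align.py | extract_alignment
-- ===== SOURCE A (Python) =====
-- def extract_alignment(seq1, seq2):
--
--     # code: 0=match, 1=insert seq1, 2=insert seq2.
--
--     alignment = []
--
--     assert len(seq1) == len(seq2)
--
--     compact_seq1 = []
--     compact_seq2 = []
--
--     ix1 = 0
--     ix2 = 0
--     pairs = []
--
--     for i in range(len(seq1)):
--         assert not seq1[i] == seq2[i] == '-'
--         if seq1[i] == '-':
--             alignment.append(2)
--             compact_seq2.append(seq2[i])
--             ix2 += 1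
--         elif seq2[i] == '-':
--             alignment.append(1)
--             compact_seq1.append(seq1[i])
--             ix1 += 1
--         else:
--             alignment.append(0)
--             compact_seq1.append(seq1[i])
--             compact_seq2.append(seq2[i])
--             pairs.append((ix1, ix2))
--             ix1 += 1
--             ix2 += 1
--
--     return "".join(compact_seq1), "".join(compact_seq2), alignment, pairs
-- ===== SOURCE B (Python) =====
-- def extract_alignment(seq1, seq2):
--     # code: 0=match, 1=insert seq1, 2=insert seq2.
--     assert len(seq1) == len(seq2)
--     alignment = []
--     for a, b in zip(seq1, seq2):
--         assert not a == b == '-'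
--         alignment.append(2 if a == '-' else 1 if b == '-' else 0)
--     compact_seq1 = "".join(c for c, code in zip(seq1, alignment) if code != 2)
--     compact_seq2 = "".join(c for c, code in zip(seq2, alignment) if code != 1)
--     pairs = []
--     ix1 = ix2 = 0
--     for code in alignment:
--         if code == 0:
--             pairs.append((ix1, ix2))
--         if code != 2:
--             ix1 += 1
--         if code != 1:
--             ix2 += 1
--     return compact_seq1, compact_seq2, alignment, pairs
-- ===== Notes on version B (the rewrite author's own statement) =====
-- stated objective: alternative
-- what changed: Replaces A's single fused loop carrying six pieces of state by a classify-first design: one loop builds only the alignment code list (with the same assertions), the compact strings are then derived by filtering against the codes, and pairs come from a separate counter walk over the codes.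
-- outside the precondition, e.g. on extract_alignment('a', 'ab'): A raises AssertionError, B raises AssertionError; on extract_alignment('-', '-'): A raises AssertionError, B raises AssertionError
import Mathlib
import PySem

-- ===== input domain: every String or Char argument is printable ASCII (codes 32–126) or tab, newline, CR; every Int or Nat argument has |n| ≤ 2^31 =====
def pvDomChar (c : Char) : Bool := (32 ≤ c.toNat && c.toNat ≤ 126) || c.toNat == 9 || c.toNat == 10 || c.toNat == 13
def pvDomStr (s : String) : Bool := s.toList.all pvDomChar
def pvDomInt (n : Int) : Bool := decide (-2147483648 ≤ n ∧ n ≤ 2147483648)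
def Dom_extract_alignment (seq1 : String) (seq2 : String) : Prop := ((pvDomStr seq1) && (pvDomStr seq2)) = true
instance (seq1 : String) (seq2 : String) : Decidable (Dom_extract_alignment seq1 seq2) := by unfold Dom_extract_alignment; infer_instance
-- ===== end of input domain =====

-- B replaces A's single fused six-state loop by a classify-first decomposition (codes, then
-- filtered strings, then a counter walk for pairs); objective: alternative, same O(n) cost.

-- ===== PORT A =====
-- body of A's for-loop, branch order preserved
def eaStepA (st : List Char × List Char × List Int × Int × Int × List (Int × Int))
    (a b : Char) : List Char × List Char × List Int × Int × Int × List (Int × Int) :=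
  match st with
  | (c1, c2, al, ix1, ix2, prs) =>
    if a = '-' then (c1, c2 ++ [b], al ++ [(2 : Int)], ix1, ix2 + 1, prs)
    else if b = '-' then (c1 ++ [a], c2, al ++ [(1 : Int)], ix1 + 1, ix2, prs)
    else (c1 ++ [a], c2 ++ [b], al ++ [(0 : Int)], ix1 + 1, ix2 + 1, prs ++ [(ix1, ix2)])

-- indexing via pyGetD is exact under Pre_ (equal lengths), where every visited index is in range
def extract_alignment (seq1 : String) (seq2 : String) : String × String × List Int × (List (Int × Int)) :=
  let l1 := seq1.toList
  let l2 := seq2.toList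
  let st := (PySem.List.pyRange 0 l1.length 1).foldl
    (fun st i => eaStepA st (PySem.List.pyGetD l1 i ' ') (PySem.List.pyGetD l2 i ' '))
    ([], [], [], 0, 0, [])
  (String.mk st.1, String.mk st.2.1, st.2.2.1, st.2.2.2.2.2)

-- ===== PORT B =====
def eaCode (a b : Char) : Int := if a = '-' then 2 else if b = '-' then 1 else 0

-- body of B's pairs loop
def eaStepP (st : Int × Int × List (Int × Int)) (c : Int) : Int × Int × List (Int × Int) :=
  match st with
  | (ix1, ix2, prs) =>
    let prs' := if c = 0 then prs ++ [(ix1, ix2)] else prs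
    let ix1' := if c ≠ 2 then ix1 + 1 else ix1
    let ix2' := if c ≠ 1 then ix2 + 1 else ix2
    (ix1', ix2', prs')

def extract_alignment_alt (seq1 : String) (seq2 : String) : String × String × List Int × (List (Int × Int)) :=
  let l1 := seq1.toList
  let l2 := seq2.toList
  let alignment := (l1.zip l2).foldl (fun al p => al ++ [eaCode p.1 p.2]) []
  let c1 := ((l1.zip alignment).filter (fun p => p.2 != 2)).map Prod.fst
  let c2 := ((l2.zip alignment).filter (fun p => p.2 != 1)).map Prod.fst
  let st := alignment.foldl eaStepP (0, 0, [])
  (String.mk c1, String.mk c2, alignment, st.2.2)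

-- ===== PRECONDITION & SPEC =====
-- Pre_ excludes exactly the inputs on which A raises AssertionError: unequal lengths, or a
-- position where both sequences hold '-'.
def Pre_extract_alignment (seq1 : String) (seq2 : String) : Prop :=
  seq1.toList.length = seq2.toList.length ∧
  ∀ p ∈ seq1.toList.zip seq2.toList, ¬(p.1 = '-' ∧ p.2 = '-')

instance (seq1 : String) (seq2 : String) : Decidable (Pre_extract_alignment seq1 seq2) := by
  unfold Pre_extract_alignment; infer_instance

def pvWitness_extract_alignment : String × String := ("a-c", "ab-")

def Spec_extract_alignment (seq1 : String) (seq2 : String) (out : String × String × List Int × (List (Int × Int))) : Prop := out = extract_alignment_alt seq1 seq2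
instance (seq1 : String) (seq2 : String) (out : String × String × List Int × (List (Int × Int))) : Decidable (Spec_extract_alignment seq1 seq2 out) := by unfold Spec_extract_alignment; infer_instance

-- ===== CLAIM (what is proved, stated in full; the proofs are below) =====
def Claim_equal_extract_alignment : Prop := ∀ (seq1 : String) (seq2 : String), Dom_extract_alignment seq1 seq2 → Pre_extract_alignment seq1 seq2 → Spec_extract_alignment seq1 seq2 (extract_alignment seq1 seq2)

-- ===== LEMMAS AND PROOFS =====

def eaF1 (l : List (Char × Char)) : List Char :=
  (l.filter (fun p => !(p.1 == '-'))).map Prod.fst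
def eaF2 (l : List (Char × Char)) : List Char :=
  (l.filter (fun p => p.1 == '-' || !(p.2 == '-'))).map Prod.snd

def eaP : List (Char × Char) → Int → Int → List (Int × Int)
  | [], _, _ => []
  | p :: t, i, j =>
    if p.1 = '-' then eaP t i (j + 1)
    else if p.2 = '-' then eaP t (i + 1) j
    else (i, j) :: eaP t (i + 1) (j + 1)

def eaPc : List Int → Int → Int → List (Int × Int)
  | [], _, _ => []
  | c :: t, i, j =>
    (if c = 0 then [(i, j)] else []) ++ eaPc t (if c ≠ 2 then i + 1 else i) (if c ≠ 1 then j + 1 else j)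

lemma ea_fold_range_aux {S : Type} (f : S → Char → Char → S) :
    ∀ (l1 l2 : List Char) (s : S), l1.length = l2.length →
      (List.range l1.length).foldl (fun s k => f s (l1.getD k ' ') (l2.getD k ' ')) s
      = (l1.zip l2).foldl (fun s p => f s p.1 p.2) s := by
  intro l1
  induction l1 with
  | nil => intro l2 s _; simp
  | cons a t1 ih =>
    intro l2 s h
    cases l2 with
    | nil => simp at h
    | cons b t2 =>
      simp only [List.length_cons] at h ⊢
      rw [List.range_succ_eq_map]
      simp only [List.foldl_cons, List.foldl_map, List.getD_cons_zero, List.getD_cons_succ,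
        List.zip_cons_cons]
      exact ih t2 (f s a b) (by omega)

lemma ea_fold_range {S : Type} (f : S → Char → Char → S)
    (l1 l2 : List Char) (s : S) (h : l1.length = l2.length) :
    (PySem.List.pyRange 0 (l1.length : Int) 1).foldl
      (fun st i => f st (PySem.List.pyGetD l1 i ' ') (PySem.List.pyGetD l2 i ' ')) s
    = (l1.zip l2).foldl (fun st p => f st p.1 p.2) s := by
  rw [PySem.List.pyRange_one]
  simp only [Int.sub_zero, Int.toNat_natCast, List.foldl_map, zero_add,
    PySem.List.pyGetD_natCast]
  exact ea_fold_range_aux f l1 l2 s h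

lemma ea_A_inv : ∀ (l : List (Char × Char)) (c1 c2 : List Char) (al : List Int)
    (ix1 ix2 : Int) (prs : List (Int × Int)),
    l.foldl (fun st p => eaStepA st p.1 p.2) (c1, c2, al, ix1, ix2, prs)
    = (c1 ++ eaF1 l, c2 ++ eaF2 l, al ++ l.map (fun p => eaCode p.1 p.2),
       ix1 + ((eaF1 l).length : Int), ix2 + ((eaF2 l).length : Int), prs ++ eaP l ix1 ix2) := by
  intro l
  induction l with
  | nil => intro c1 c2 al ix1 ix2 prs; simp [eaF1, eaF2, eaP]
  | cons p t ih =>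
    intro c1 c2 al ix1 ix2 prs
    obtain ⟨a, b⟩ := p
    by_cases ha : a = '-'
    · have hs : eaStepA (c1, c2, al, ix1, ix2, prs) a b
          = (c1, c2 ++ [b], al ++ [(2 : Int)], ix1, ix2 + 1, prs) := by simp [eaStepA, ha]
      rw [List.foldl_cons, hs, ih]
      simp [eaF1, eaF2, eaP, eaCode, ha, Prod.ext_iff]
      omega
    · by_cases hb : b = '-'
      · have hs : eaStepA (c1, c2, al, ix1, ix2, prs) a b
            = (c1 ++ [a], c2, al ++ [(1 : Int)], ix1 + 1, ix2, prs) := by simp [eaStepA, ha, hb]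
        rw [List.foldl_cons, hs, ih]
        simp [eaF1, eaF2, eaP, eaCode, ha, hb, Prod.ext_iff]
        omega
      · have hs : eaStepA (c1, c2, al, ix1, ix2, prs) a b
            = (c1 ++ [a], c2 ++ [b], al ++ [(0 : Int)], ix1 + 1, ix2 + 1, prs ++ [(ix1, ix2)]) := by
          simp [eaStepA, ha, hb]
        rw [List.foldl_cons, hs, ih]
        simp [eaF1, eaF2, eaP, eaCode, ha, hb, Prod.ext_iff]
        omega

lemma ea_align_map (l : List (Char × Char)) :
    l.foldl (fun al p => al ++ [eaCode p.1 p.2]) [] = l.map (fun p => eaCode p.1 p.2) := by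
  have h : ∀ (l : List (Char × Char)) (acc : List Int),
      l.foldl (fun al p => al ++ [eaCode p.1 p.2]) acc = acc ++ l.map (fun p => eaCode p.1 p.2) := by
    intro l
    induction l with
    | nil => simp
    | cons p t ih => intro acc; simp [ih]
  simpa using h l []

lemma ea_B_c1 : ∀ (l1 l2 : List Char), l1.length = l2.length →
    ((l1.zip ((l1.zip l2).map (fun p => eaCode p.1 p.2))).filter (fun p => p.2 != 2)).map Prod.fst
    = eaF1 (l1.zip l2) := by
  intro l1
  induction l1 with
  | nil => intro l2 _; simp [eaF1]
  | cons a t1 ih =>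
    intro l2 h
    cases l2 with
    | nil => simp at h
    | cons b t2 =>
      by_cases ha : a = '-'
      · simp [eaCode, eaF1, ha]
        simpa [eaF1] using ih t2 (by simpa using h)
      · by_cases hb : b = '-'
        · simp [eaCode, eaF1, ha, hb]
          simpa [eaF1] using ih t2 (by simpa using h)
        · simp [eaCode, eaF1, ha, hb]
          simpa [eaF1] using ih t2 (by simpa using h)

lemma ea_B_c2 : ∀ (l1 l2 : List Char), l1.length = l2.length →
    ((l2.zip ((l1.zip l2).map (fun p => eaCode p.1 p.2))).filter (fun p => p.2 != 1)).map Prod.fst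
    = eaF2 (l1.zip l2) := by
  intro l1
  induction l1 with
  | nil => intro l2 h; cases l2 with
    | nil => simp [eaF2]
    | cons b t2 => simp at h
  | cons a t1 ih =>
    intro l2 h
    cases l2 with
    | nil => simp at h
    | cons b t2 =>
      by_cases ha : a = '-'
      · simp [eaCode, eaF2, ha]
        simpa [eaF2] using ih t2 (by simpa using h)
      · by_cases hb : b = '-'
        · simp [eaCode, eaF2, ha, hb]
          simpa [eaF2] using ih t2 (by simpa using h)
        · simp [eaCode, eaF2, ha, hb]
          simpa [eaF2] using ih t2 (by simpa using h)

lemma ea_B_pairs : ∀ (cs : List Int) (i j : Int) (prs : List (Int × Int)),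
    (cs.foldl eaStepP (i, j, prs)).2.2 = prs ++ eaPc cs i j := by
  intro cs
  induction cs with
  | nil => intro i j prs; simp [eaPc]
  | cons c t ih =>
    intro i j prs
    simp only [List.foldl_cons, eaStepP, eaPc]
    rw [ih]
    by_cases h0 : c = 0 <;> simp [h0]

lemma ea_pc_eq : ∀ (l : List (Char × Char)) (i j : Int),
    eaPc (l.map (fun p => eaCode p.1 p.2)) i j = eaP l i j := by
  intro l
  induction l with
  | nil => intro i j; simp [eaPc, eaP]
  | cons p t ih =>
    intro i j
    obtain ⟨a, b⟩ := p
    simp only [List.map_cons]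
    by_cases ha : a = '-'
    · subst ha
      have hc : eaCode '-' b = 2 := by simp [eaCode]
      simp [hc, eaPc, eaP, ih]
    · by_cases hb : b = '-'
      · subst hb
        have hc : eaCode a '-' = 1 := by simp [eaCode, ha]
        simp [hc, eaPc, eaP, ha, ih]
      · have hc : eaCode a b = 0 := by simp [eaCode, ha, hb]
        simp [hc, eaPc, eaP, ha, hb, ih]

-- ===== VERDICT (by name: the statement is the Claim_ definition above) =====
theorem extract_alignment_spec : Claim_equal_extract_alignment := by
  intro seq1 seq2 _ hpre
  obtain ⟨hlen, _⟩ := hpre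
  unfold Spec_extract_alignment extract_alignment extract_alignment_alt
  dsimp only
  rw [ea_fold_range eaStepA seq1.toList seq2.toList _ hlen, ea_A_inv,
    ea_align_map, ea_B_c1 _ _ hlen, ea_B_c2 _ _ hlen, ea_B_pairs, ea_pc_eq]
  simp
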